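-- pv_equiv track=rewrite | github.com/satvikpathak/Suspicious-Behavior-Detection-System | src/main.py | categorize_object_enhanced
-- ===== SOURCE A (Python) =====
-- WEAPON_CLASSES = {
--     'gun': ['gun', 'pistol', 'rifle', 'firearm', 'handgun', 'revolver', 'shotgun', 'weapon'],
--     'knife': ['knife', 'blade', 'sword', 'dagger', 'machete', 'cleaver'],
--     'blunt_weapon': ['bat', 'stick', 'club', 'hammer', 'baton', 'pipe'],
--     'explosive': ['bomb', 'grenade', 'explosive', 'dynamite']
-- }
--
-- WEAPON_KEYWORDS = {
--     'handgun': ['gun', 'pistol', 'handgun', 'revolver', 'firearm'],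
--     'rifle': ['rifle', 'shotgun', 'carbine', 'assault'],
--     'knife': ['knife', 'blade', 'dagger', 'machete'],
--     'blunt': ['bat', 'club', 'hammer', 'baton', 'stick']
-- }
--
-- SUSPICIOUS_OBJECTS = ['bottle', 'scissors', 'axe', 'chainsaw', 'tool', 'screwdriver', 'wrench']
--
-- COMMON_OBJECTS = ['cell phone', 'phone', 'laptop', 'bag', 'backpack', 'book', 'cup', 'remote', 'mouse']
--
-- def categorize_object_enhanced(label):
--     """Enhanced object categorization with specific weapon types"""
--     label_lower = label.lower()
--
--     # Check for specific weapon types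
--     for weapon_type, keywords in WEAPON_KEYWORDS.items():
--         if any(keyword in label_lower for keyword in keywords):
--             return f"weapon_{weapon_type}", weapon_type.upper()
--
--     # Check general weapon categories
--     for weapon_type, keywords in WEAPON_CLASSES.items():
--         if any(keyword in label_lower for keyword in keywords):
--             return f"weapon_{weapon_type}", weapon_type.upper()
--
--     # Check suspicious objects
--     if any(obj in label_lower for obj in SUSPICIOUS_OBJECTS):
--         return "suspicious_object", None
--
--     # Check common objects to avoid false positives
--     if any(obj in label_lower for obj in COMMON_OBJECTS):
--         return "common_object", None
--
--     if label_lower == "person":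
--         return "person", None
--
--     return "other", None
-- ===== SOURCE B (Python) =====
-- WEAPON_CLASSES = {
--     'gun': ['gun', 'pistol', 'rifle', 'firearm', 'handgun', 'revolver', 'shotgun', 'weapon'],
--     'knife': ['knife', 'blade', 'sword', 'dagger', 'machete', 'cleaver'],
--     'blunt_weapon': ['bat', 'stick', 'club', 'hammer', 'baton', 'pipe'],
--     'explosive': ['bomb', 'grenade', 'explosive', 'dynamite']
-- }
--
-- WEAPON_KEYWORDS = {
--     'handgun': ['gun', 'pistol', 'handgun', 'revolver', 'firearm'],
--     'rifle': ['rifle', 'shotgun', 'carbine', 'assault'],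
--     'knife': ['knife', 'blade', 'dagger', 'machete'],
--     'blunt': ['bat', 'club', 'hammer', 'baton', 'stick']
-- }
--
-- SUSPICIOUS_OBJECTS = ['bottle', 'scissors', 'axe', 'chainsaw', 'tool', 'screwdriver', 'wrench']
--
-- COMMON_OBJECTS = ['cell phone', 'phone', 'laptop', 'bag', 'backpack', 'book', 'cup', 'remote', 'mouse']
--
-- # Flat priority-ordered keyword table (priority = first-match order of A's staged checks).
-- TABLE = (
--     [(kw, (f"weapon_{t}", t.upper())) for t, kws in WEAPON_KEYWORDS.items() for kw in kws]
--     + [(kw, (f"weapon_{t}", t.upper())) for t, kws in WEAPON_CLASSES.items() for kw in kws]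
--     + [(kw, ("suspicious_object", None)) for kw in SUSPICIOUS_OBJECTS]
--     + [(kw, ("common_object", None)) for kw in COMMON_OBJECTS]
-- )
--
-- def categorize_object_enhanced(label):
--     """Enhanced object categorization with specific weapon types.
--
--     Text-driven matcher: walk the label once position by position; at each
--     position take the first table keyword that matches as a prefix there, and
--     keep the best (lowest-priority) match seen anywhere in the label.
--     """
--     s = label.lower()
--     best = None  # (priority, result) of the best keyword matched so far
--     for i in range(len(s)):
--         hit = next(((p, res) for p, (kw, res) in enumerate(TABLE)
--                     if s.startswith(kw, i)), None)
--         if hit is not None and (best is None or hit[0] < best[0]):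
--             best = hit
--     if best is not None:
--         return best[1]
--     if s == "person":
--         return "person", None
--     return "other", None
-- ===== Notes on version B (the rewrite author's own statement) =====
-- stated objective: alternative
-- what changed: Replaces A's keyword-driven staged category scans (substring test per keyword per category) by a text-driven matcher: one walk over the label's positions, prefix-matching against a flat priority table at each position and keeping the minimum-priority hit.
import Mathlib
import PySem

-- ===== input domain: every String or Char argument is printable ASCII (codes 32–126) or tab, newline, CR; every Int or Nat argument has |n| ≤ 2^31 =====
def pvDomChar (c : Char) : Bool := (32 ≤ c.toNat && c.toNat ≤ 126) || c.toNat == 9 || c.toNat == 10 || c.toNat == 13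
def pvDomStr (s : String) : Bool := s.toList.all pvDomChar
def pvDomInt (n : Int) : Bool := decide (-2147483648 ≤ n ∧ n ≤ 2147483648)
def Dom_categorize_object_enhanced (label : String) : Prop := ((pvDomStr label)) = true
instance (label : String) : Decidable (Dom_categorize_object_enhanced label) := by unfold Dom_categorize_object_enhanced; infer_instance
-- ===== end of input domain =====

-- B replaces A's keyword-driven staged category scans by a text-driven matcher:
-- one walk over the label's positions, prefix-matching a flat priority table and
-- keeping the minimum-priority hit; same results, a different traversal of the problem.


-- ===== PORT A =====
def pvWEAPON_CLASSES : List (String × List String) :=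
  [("gun", ["gun", "pistol", "rifle", "firearm", "handgun", "revolver", "shotgun", "weapon"]),
   ("knife", ["knife", "blade", "sword", "dagger", "machete", "cleaver"]),
   ("blunt_weapon", ["bat", "stick", "club", "hammer", "baton", "pipe"]),
   ("explosive", ["bomb", "grenade", "explosive", "dynamite"])]

def pvWEAPON_KEYWORDS : List (String × List String) :=
  [("handgun", ["gun", "pistol", "handgun", "revolver", "firearm"]),
   ("rifle", ["rifle", "shotgun", "carbine", "assault"]),
   ("knife", ["knife", "blade", "dagger", "machete"]),
   ("blunt", ["bat", "club", "hammer", "baton", "stick"])]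

def pvSUSPICIOUS_OBJECTS : List String :=
  ["bottle", "scissors", "axe", "chainsaw", "tool", "screwdriver", "wrench"]

def pvCOMMON_OBJECTS : List String :=
  ["cell phone", "phone", "laptop", "bag", "backpack", "book", "cup", "remote", "mouse"]

-- A's 'for weapon_type, keywords in …: if any(…): return f"weapon_{…}", ….upper()' loop
def pvWeaponLoop (s : String) : List (String × List String) → Option (String × Option String)
  | [] => none
  | (t, ks) :: rest =>
    if ks.any (fun k => PySem.Str.isIn k s) then
      some ("weapon_" ++ t, some (PySem.Str.upper t))
    else pvWeaponLoop s rest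

def categorize_object_enhanced (label : String) : String × Option String :=
  let label_lower := PySem.Str.lower label
  match pvWeaponLoop label_lower pvWEAPON_KEYWORDS with
  | some r => r
  | none =>
    match pvWeaponLoop label_lower pvWEAPON_CLASSES with
    | some r => r
    | none =>
      if pvSUSPICIOUS_OBJECTS.any (fun o => PySem.Str.isIn o label_lower) then
        ("suspicious_object", none)
      else if pvCOMMON_OBJECTS.any (fun o => PySem.Str.isIn o label_lower) then
        ("common_object", none)
      else if label_lower == "person" then ("person", none)
      else ("other", none)

-- ===== PORT B =====
-- B's flat priority table TABLE, built once from the four keyword groups (as in Source B)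
def pvTABLE : List (String × (String × Option String)) :=
  (pvWEAPON_KEYWORDS.flatMap (fun g => g.2.map (fun k => (k, ("weapon_" ++ g.1, some (PySem.Str.upper g.1))))))
  ++ (pvWEAPON_CLASSES.flatMap (fun g => g.2.map (fun k => (k, ("weapon_" ++ g.1, some (PySem.Str.upper g.1))))))
  ++ (pvSUSPICIOUS_OBJECTS.map (fun k => (k, ("suspicious_object", none))))
  ++ (pvCOMMON_OBJECTS.map (fun k => (k, ("common_object", none))))

-- Source B's 'next(((p, res) for p, (kw, res) in enumerate(TABLE) if s.startswith(kw, i)), None)';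
-- s.startswith(kw, i) with 0 ≤ i is exactly a prefix test on s.drop i
def pvHit (s : List Char) (i : Nat) : Option (Int × (String × Option String)) :=
  ((PySem.List.enumerate pvTABLE 0).find?
      (fun e => PySem.Chars.startswith (s.drop i) e.2.1.toList)).map (fun e => (e.1, e.2.2))

-- one iteration of Source B's 'for i in range(len(s))' loop body, acc = best
def pvStep (s : List Char) (best : Option (Int × (String × Option String))) (i : Nat) :
    Option (Int × (String × Option String)) :=
  match pvHit s i with
  | none => best
  | some h =>
    match best with
    | none => some h
    | some b => if h.1 < b.1 then some h else best

def categorize_object_enhanced_alt (label : String) : String × Option String :=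
  let s := PySem.Str.lower label
  let cs := s.toList
  match (List.range cs.length).foldl (pvStep cs) none with
  | some b => b.2
  | none => if s == "person" then ("person", none) else ("other", none)

-- ===== PRECONDITION & SPEC =====
def Spec_categorize_object_enhanced (label : String) (out : String × Option String) : Prop := out = categorize_object_enhanced_alt label
instance (label : String) (out : String × Option String) : Decidable (Spec_categorize_object_enhanced label out) := by unfold Spec_categorize_object_enhanced; infer_instance

-- ===== CLAIM (what is proved, stated in full; the proofs are below) =====
def Claim_equal_categorize_object_enhanced : Prop := ∀ (label : String), Dom_categorize_object_enhanced label → Spec_categorize_object_enhanced label (categorize_object_enhanced label)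

-- ===== LEMMAS AND PROOFS =====

-- unfolding equations for one loop iteration
lemma pvStep_none {s : List Char} {i : Nat} (h : pvHit s i = none)
    (best : Option (Int × (String × Option String))) : pvStep s best i = best := by
  simp [pvStep, h]

lemma pvStep_some_none {s : List Char} {i : Nat} {h : Int × (String × Option String)}
    (hh : pvHit s i = some h) : pvStep s none i = some h := by
  simp [pvStep, hh]

lemma pvStep_some_some {s : List Char} {i : Nat} {h b : Int × (String × Option String)}
    (hh : pvHit s i = some h) :
    pvStep s (some b) i = if h.1 < b.1 then some h else some b := by
  simp [pvStep, hh]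

-- A's staged scans, fused: A equals 'first entry of the flat table whose keyword is in s'
-- (step 1 of the proof; find? over a constant-result block, then over a flattened group list)
lemma pv_find_block (s : String) (v : String × Option String) (ks : List String)
    (rest : List (String × (String × Option String))) :
    ((ks.map (fun k => (k, v)) ++ rest).find? (fun p => PySem.Str.isIn p.1 s)).map Prod.snd
      = if ks.any (fun k => PySem.Str.isIn k s) then some v
        else (rest.find? (fun p => PySem.Str.isIn p.1 s)).map Prod.snd := by
  induction ks with
  | nil => rfl
  | cons k ks ih =>
    rw [List.map_cons, List.cons_append]
    cases h : PySem.Str.isIn k s with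
    | true =>
      rw [List.find?_cons_of_pos (by exact h)]
      simp only [List.any_cons, h, Bool.true_or]
      rfl
    | false =>
      rw [List.find?_cons_of_neg (by simpa using h), ih]
      simp only [List.any_cons, h, Bool.false_or]

lemma pv_find_groups (s : String) (gs : List (String × List String))
    (rest : List (String × (String × Option String))) :
    ((gs.flatMap (fun g => g.2.map (fun k => (k, ("weapon_" ++ g.1, some (PySem.Str.upper g.1))))) ++ rest).find?
        (fun p => PySem.Str.isIn p.1 s)).map Prod.snd
      = match pvWeaponLoop s gs with
        | some r => some r
        | none => (rest.find? (fun p => PySem.Str.isIn p.1 s)).map Prod.snd := by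
  induction gs with
  | nil => rfl
  | cons g gs ih =>
    obtain ⟨t, ks⟩ := g
    rw [List.flatMap_cons, List.append_assoc, pv_find_block, ih]
    simp only [pvWeaponLoop]
    cases h : ks.any (fun k => PySem.Str.isIn k s) with
    | true => rfl
    | false => rfl

-- A = the flat-table first match (with A's own fallbacks)
lemma pv_A_eq_tableFind (label : String) :
    categorize_object_enhanced label
      = (let s := PySem.Str.lower label
         match (pvTABLE.find? (fun p => PySem.Str.isIn p.1 s)).map Prod.snd with
         | some r => r
         | none => if s == "person" then ("person", none) else ("other", none)) := by
  simp only [categorize_object_enhanced]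
  set s := PySem.Str.lower label with hs
  have htbl :
      (pvTABLE.find? (fun p => PySem.Str.isIn p.1 s)).map Prod.snd
        = match pvWeaponLoop s pvWEAPON_KEYWORDS with
          | some r => some r
          | none =>
            match pvWeaponLoop s pvWEAPON_CLASSES with
            | some r => some r
            | none =>
              if pvSUSPICIOUS_OBJECTS.any (fun o => PySem.Str.isIn o s) then
                some ("suspicious_object", none)
              else if pvCOMMON_OBJECTS.any (fun o => PySem.Str.isIn o s) then
                some ("common_object", none)
              else none := by
    unfold pvTABLE
    rw [List.append_assoc, List.append_assoc, pv_find_groups]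
    cases hw1 : pvWeaponLoop s pvWEAPON_KEYWORDS with
    | some r => rfl
    | none =>
      rw [pv_find_groups]
      cases hw2 : pvWeaponLoop s pvWEAPON_CLASSES with
      | some r => rfl
      | none =>
        rw [pv_find_block,
            ← List.append_nil (pvCOMMON_OBJECTS.map (fun k => (k, (("common_object" : String), (none : Option String))))),
            pv_find_block]
        cases h1 : pvSUSPICIOUS_OBJECTS.any (fun o => PySem.Str.isIn o s) with
        | true => rfl
        | false =>
          cases h2 : pvCOMMON_OBJECTS.any (fun o => PySem.Str.isIn o s) with
          | true => rfl
          | false => rfl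
  rw [htbl]
  cases hw1 : pvWeaponLoop s pvWEAPON_KEYWORDS with
  | some r => rfl
  | none =>
    cases hw2 : pvWeaponLoop s pvWEAPON_CLASSES with
    | some r => rfl
    | none =>
      cases h1 : pvSUSPICIOUS_OBJECTS.any (fun o => PySem.Str.isIn o s) with
      | true => rfl
      | false =>
        cases h2 : pvCOMMON_OBJECTS.any (fun o => PySem.Str.isIn o s) with
        | true => rfl
        | false => rfl

-- every table keyword is nonempty (so a prefix match needs a position inside the string)
lemma pv_table_keys_nonempty : ∀ e ∈ pvTABLE, e.1.toList ≠ [] := by decide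

-- if no table keyword occurs in s, every position yields no hit
lemma pv_hit_none (cs : List Char)
    (h : ∀ e ∈ pvTABLE, PySem.Chars.isIn e.1.toList cs = false) (i : Nat) :
    pvHit cs i = none := by
  unfold pvHit
  rw [List.find?_eq_none.mpr]
  · rfl
  · intro e he hsw
    obtain ⟨k, hk, rfl⟩ := (PySem.List.mem_enumerate_iff _ _ _).mp he
    have hpre : pvTABLE[k].1.toList <+: cs.drop i :=
      (PySem.Chars.startswith_iff _ _).mp (by simpa using hsw)
    have : PySem.Chars.isIn pvTABLE[k].1.toList cs = true :=
      (PySem.Chars.exists_prefix_drop_iff_isIn _ _).mp ⟨i, hpre⟩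
    rw [h _ (by simp) ] at this
    · exact absurd this (by simp)

-- folding pvStep over any index list from a no-hit string keeps the accumulator
lemma pv_fold_none (cs : List Char) (l : List Nat) (acc : Option (Int × (String × Option String)))
    (h : ∀ i, pvHit cs i = none) : l.foldl (pvStep cs) acc = acc := by
  induction l generalizing acc with
  | nil => rfl
  | cons i l ih => rw [List.foldl_cons, pvStep_none (h i)]; exact ih acc

-- once the best possible hit v* is the accumulator it survives the rest of the loop
lemma pv_fold_keep (cs : List Char) (v : Int × (String × Option String)) (l : List Nat)
    (hmin : ∀ i w, pvHit cs i = some w → v.1 ≤ w.1) :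
    l.foldl (pvStep cs) (some v) = some v := by
  induction l with
  | nil => rfl
  | cons i l ih =>
    rw [List.foldl_cons]
    cases hh : pvHit cs i with
    | none => rw [pvStep_none hh]; exact ih
    | some h =>
      have := hmin i h hh
      rw [pvStep_some_some hh, if_neg (by omega)]
      exact ih

-- main loop lemma: if some position hits v*, every hit is ≥ v*.1 and hits at v*.1 are v*,
-- then the loop returns v* from any accumulator that is none or itself a hit
lemma pv_fold_min (cs : List Char) (v : Int × (String × Option String)) (l : List Nat)
    (hmin : ∀ i w, pvHit cs i = some w → v.1 ≤ w.1 ∧ (w.1 = v.1 → w = v))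
    (acc : Option (Int × (String × Option String)))
    (hacc : acc = none ∨ ∃ w i, pvHit cs i = some w ∧ acc = some w)
    (i₀ : Nat) (hi₀ : i₀ ∈ l) (hv : pvHit cs i₀ = some v) :
    l.foldl (pvStep cs) acc = some v := by
  induction l generalizing acc with
  | nil => cases hi₀
  | cons i l ih =>
    rcases List.mem_cons.mp hi₀ with rfl | hmem
    · -- this iteration installs v (or v is already there)
      have hstep : pvStep cs acc i₀ = some v := by
        rcases hacc with rfl | ⟨w, j, hw, rfl⟩
        · exact pvStep_some_none hv
        · rcases hmin j w hw with ⟨hle, heq⟩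
          rw [pvStep_some_some hv]
          by_cases hlt : v.1 < w.1
          · rw [if_pos hlt]
          · have : w = v := heq (by omega)
            subst this
            rw [if_neg hlt]
      rw [List.foldl_cons, hstep]
      exact pv_fold_keep cs v l (fun i w hw => (hmin i w hw).1)
    · -- v is hit later; the accumulator stays none-or-a-hit
      rw [List.foldl_cons]
      refine ih _ ?_ hmem
      cases hh : pvHit cs i with
      | none => rw [pvStep_none hh]; exact hacc
      | some h =>
        rcases hacc with rfl | ⟨w, j, hw, rfl⟩
        · rw [pvStep_some_none hh]; exact Or.inr ⟨h, i, hh, rfl⟩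
        · rw [pvStep_some_some hh]
          by_cases hlt : h.1 < w.1
          · rw [if_pos hlt]; exact Or.inr ⟨h, i, hh, rfl⟩
          · rw [if_neg hlt]; exact Or.inr ⟨w, j, hw, rfl⟩

-- the whole position loop computes exactly the first table entry whose keyword occurs in cs
lemma pv_loop_eq_find (cs : List Char) :
    (List.range cs.length).foldl (pvStep cs) none
      = ((PySem.List.enumerate pvTABLE 0).find?
            (fun e => PySem.Chars.isIn e.2.1.toList cs)).map (fun e => (e.1, e.2.2)) := by
  cases hf : (PySem.List.enumerate pvTABLE 0).find? (fun e => PySem.Chars.isIn e.2.1.toList cs) with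
  | none =>
    have hnone : ∀ e ∈ pvTABLE, PySem.Chars.isIn e.1.toList cs = false := by
      intro e he
      have hmem : ((0 : Int) + (pvTABLE.idxOf e : Nat), e) ∈ PySem.List.enumerate pvTABLE 0 := by
        rw [PySem.List.mem_enumerate_iff]
        exact ⟨pvTABLE.idxOf e, List.idxOf_lt_length_of_mem he, by rw [List.getElem_idxOf]⟩
      have := List.find?_eq_none.mp hf _ hmem
      simpa using this
    rw [pv_fold_none cs _ none (pv_hit_none cs hnone)]
    rfl
  | some e =>
    obtain ⟨hpe, l₁, l₂, hdec, hl₁⟩ := List.find?_eq_some_iff_append.mp hf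
    -- indices in l₁ are below e.1, indices in l₂ above (enumerate is index-sorted)
    have hPW := PySem.List.pairwise_lt_enumerate pvTABLE 0
    rw [hdec] at hPW
    have hl₁lt : ∀ x ∈ l₁, x.1 < e.1 := by
      intro x hx
      exact (List.pairwise_append.mp hPW).2.2 x hx e (List.mem_cons_self ..)
    have hl₂gt : ∀ x ∈ l₂, e.1 < x.1 := by
      have := (List.pairwise_append.mp hPW).2.1
      exact (List.pairwise_cons.mp this).1
    -- minimality of e among entries whose keyword occurs in cs
    have hminIn : ∀ x, x ∈ PySem.List.enumerate pvTABLE 0 →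
        PySem.Chars.isIn x.2.1.toList cs = true → e.1 ≤ x.1 ∧ (x.1 = e.1 → x = e) := by
      intro x hx hin
      rw [hdec] at hx
      rcases List.mem_append.mp hx with hx1 | hx2
      · exact absurd hin (by simpa using hl₁ x hx1)
      · rcases List.mem_cons.mp hx2 with rfl | hx2
        · exact ⟨le_refl _, fun _ => rfl⟩
        · have := hl₂gt x hx2
          exact ⟨by omega, fun h => absurd h (by omega)⟩
    -- every hit is ≥ e.1, and a hit at priority e.1 is exactly (e.1, e.2.2)
    have hmin : ∀ i w, pvHit cs i = some w → e.1 ≤ w.1 ∧ (w.1 = e.1 → w = (e.1, e.2.2)) := by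
      intro i w hw
      unfold pvHit at hw
      cases hfw : (PySem.List.enumerate pvTABLE 0).find?
          (fun x => PySem.Chars.startswith (cs.drop i) x.2.1.toList) with
      | none => rw [hfw] at hw; cases hw
      | some x =>
        rw [hfw] at hw
        have hxmem := List.mem_of_find?_eq_some hfw
        have hxp := List.find?_some hfw
        have hxin : PySem.Chars.isIn x.2.1.toList cs = true := by
          refine (PySem.Chars.exists_prefix_drop_iff_isIn _ _).mp ⟨i, ?_⟩
          exact (PySem.Chars.startswith_iff _ _).mp (by simpa using hxp)
        obtain ⟨hle, huniq⟩ := hminIn x hxmem hxin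
        simp only [Option.map_some] at hw
        cases hw
        refine ⟨hle, fun h1 => ?_⟩
        have : x = e := huniq h1
        rw [this]
    -- some position inside cs hits exactly (e.1, e.2.2)
    have hwitpos : ∃ i₀ ∈ List.range cs.length, pvHit cs i₀ = some (e.1, e.2.2) := by
      have hein : PySem.Chars.isIn e.2.1.toList cs = true := by simpa using hpe
      obtain ⟨j, hj⟩ := (PySem.Chars.exists_prefix_drop_iff_isIn _ _).mpr hein
      have hjlt : j < cs.length := by
        by_contra hge
        rw [List.drop_eq_nil_of_le (by omega)] at hj
        have : e.2.1.toList = [] := List.prefix_nil.mp hj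
        have hmem : e.2 ∈ pvTABLE := by
          obtain ⟨k, hk, rfl⟩ := (PySem.List.mem_enumerate_iff _ _ _).mp (List.mem_of_find?_eq_some hf)
          simp
        exact pv_table_keys_nonempty _ hmem this
      refine ⟨j, List.mem_range.mpr hjlt, ?_⟩
      unfold pvHit
      have : (PySem.List.enumerate pvTABLE 0).find?
          (fun x => PySem.Chars.startswith (cs.drop j) x.2.1.toList) = some e := by
        refine List.find?_eq_some_iff_append.mpr ⟨?_, l₁, l₂, hdec, ?_⟩
        · simpa using (PySem.Chars.startswith_iff (cs.drop j) e.2.1.toList).mpr hj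
        · intro x hx
          cases hsw : PySem.Chars.startswith (cs.drop j) x.2.1.toList with
          | false => simp
          | true =>
            have hxin : PySem.Chars.isIn x.2.1.toList cs = true := by
              refine (PySem.Chars.exists_prefix_drop_iff_isIn _ _).mp ⟨j, ?_⟩
              exact (PySem.Chars.startswith_iff _ _).mp hsw
            have hfalse := hl₁ x hx
            simp [hxin] at hfalse
      rw [this]
      rfl
    obtain ⟨i₀, hi₀, hv⟩ := hwitpos
    rw [pv_fold_min cs (e.1, e.2.2) _ hmin none (Or.inl rfl) i₀ hi₀ hv]
    rfl

-- find? over enumerate, projected to payloads, is find? over the table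
lemma pv_find_enum {α : Type} (l : List (String × α)) (p : String → Bool) (st : Int) :
    ((PySem.List.enumerate l st).find? (fun e => p e.2.1)).map (fun e => e.2.2)
      = (l.find? (fun x => p x.1)).map Prod.snd := by
  induction l generalizing st with
  | nil => rfl
  | cons x l ih =>
    rw [PySem.List.enumerate_cons]
    cases h : p x.1 with
    | true =>
      rw [List.find?_cons_of_pos (by exact h), List.find?_cons_of_pos (by exact h)]
      rfl
    | false =>
      rw [List.find?_cons_of_neg (by simpa using h), List.find?_cons_of_neg (by simpa using h)]
      exact ih (st + 1)

-- ===== VERDICT (by name: the statement is the Claim_ definition above) =====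
theorem categorize_object_enhanced_spec : Claim_equal_categorize_object_enhanced := by
  intro label _
  unfold Spec_categorize_object_enhanced
  rw [pv_A_eq_tableFind]
  simp only [categorize_object_enhanced_alt]
  set s := PySem.Str.lower label with hs
  rw [pv_loop_eq_find s.toList]
  have hbridge : (fun e : Int × (String × (String × Option String)) =>
      PySem.Chars.isIn e.2.1.toList s.toList) = (fun e => PySem.Str.isIn e.2.1 s) := by
    funext e; simp [PySem.Str.isIn_eq]
  rw [hbridge]
  have := pv_find_enum pvTABLE (fun k => PySem.Str.isIn k s) 0
  cases hfe : (PySem.List.enumerate pvTABLE 0).find? (fun e => PySem.Str.isIn e.2.1 s) with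
  | none =>
    rw [hfe] at this
    rw [← this]
    rfl
  | some e =>
    rw [hfe] at this
    rw [← this]
    rfl
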